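-- pv_equiv track=rewrite | github.com/sujitnair-cloud/sujit | Desktop/MultiScan1.py | group_contiguous_bins
-- ===== SOURCE A (Python) =====
-- def group_contiguous_bins(active_bins):
--     """Group contiguous active bins for bandwidth analysis"""
--     groups = []
--     current_group = []
--
--     for i, is_active in enumerate(active_bins):
--         if is_active:
--             current_group.append(i)
--         elif current_group:
--             groups.append(current_group)
--             current_group = []
--
--     if current_group:
--         groups.append(current_group)
--
--     return groups
-- ===== SOURCE B (Python) =====
-- def group_contiguous_bins(active_bins):
--     """Group contiguous active bins for bandwidth analysis"""
--     b = [bool(x) for x in active_bins]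
--     starts = [i for i, (prev, cur) in enumerate(zip([False] + b, b)) if cur and not prev]
--     ends = [i + 1 for i, (cur, nxt) in enumerate(zip(b, b[1:] + [False])) if cur and not nxt]
--     return [list(range(s, e)) for s, e in zip(starts, ends)]
-- ===== Notes on version B (the rewrite author's own statement) =====
-- stated objective: alternative
-- what changed: Replaces A's single-pass (groups, current_group) accumulator state machine by boundary detection: two edge-detecting passes over shifted copies of the list compute the run start and end indices, which are then zipped and materialized as range lists.
import Mathlib
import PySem

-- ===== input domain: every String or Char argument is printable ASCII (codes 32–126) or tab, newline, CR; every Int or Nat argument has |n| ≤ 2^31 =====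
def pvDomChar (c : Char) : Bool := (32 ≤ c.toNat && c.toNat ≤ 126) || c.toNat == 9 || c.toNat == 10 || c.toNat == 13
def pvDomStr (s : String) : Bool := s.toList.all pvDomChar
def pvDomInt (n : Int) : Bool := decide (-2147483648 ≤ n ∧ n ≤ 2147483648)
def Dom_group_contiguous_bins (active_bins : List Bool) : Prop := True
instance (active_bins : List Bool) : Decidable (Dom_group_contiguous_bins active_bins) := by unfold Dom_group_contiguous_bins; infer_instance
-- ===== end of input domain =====

-- B replaces A's accumulator state machine by edge detection over shifted copies of
-- the list (start/end boundary indices, zipped into ranges); same O(n) cost.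

-- ===== PORT A =====
-- A's for-loop over enumerate(active_bins), carrying (groups, current_group) and the index i.
def loopA : Int → List (List Int) × List Int → List Bool → List (List Int) × List Int
  | _, st, [] => st
  | i, (groups, cur), b :: rest =>
      if b then loopA (i + 1) (groups, cur ++ [i]) rest
      else if cur ≠ [] then loopA (i + 1) (groups ++ [cur], []) rest
      else loopA (i + 1) (groups, cur) rest

-- the final 'if current_group: groups.append(current_group)'
def flushA (st : List (List Int) × List Int) : List (List Int) :=
  if st.2 ≠ [] then st.1 ++ [st.2] else st.1

def group_contiguous_bins (active_bins : List Bool) : List (List Int) :=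
  flushA (loopA 0 ([], []) active_bins)

-- ===== PORT B =====
-- starts = [i for i, (prev, cur) in enumerate(zip([False] + b, b)) if cur and not prev]
def startsB (b : List Bool) : List Int :=
  ((PySem.List.enumerate ((false :: b).zip b)).filter (fun p => p.2.2 && !p.2.1)).map (·.1)

-- ends = [i + 1 for i, (cur, nxt) in enumerate(zip(b, b[1:] + [False])) if cur and not nxt]
def endsB (b : List Bool) : List Int :=
  ((PySem.List.enumerate (b.zip (b.drop 1 ++ [false]))).filter (fun p => p.2.1 && !p.2.2)).map (·.1 + 1)

-- return [list(range(s, e)) for s, e in zip(starts, ends)]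
def group_contiguous_bins_alt (active_bins : List Bool) : List (List Int) :=
  ((startsB active_bins).zip (endsB active_bins)).map
    (fun p => PySem.List.pyRange p.1 p.2 1)

-- ===== PRECONDITION & SPEC =====
def Spec_group_contiguous_bins (active_bins : List Bool) (out : List (List Int)) : Prop := out = group_contiguous_bins_alt active_bins
instance (active_bins : List Bool) (out : List (List Int)) : Decidable (Spec_group_contiguous_bins active_bins out) := by unfold Spec_group_contiguous_bins; infer_instance

-- ===== CLAIM (what is proved, stated in full; the proofs are below) =====
def Claim_equal_group_contiguous_bins : Prop := ∀ (active_bins : List Bool), Dom_group_contiguous_bins active_bins → Spec_group_contiguous_bins active_bins (group_contiguous_bins active_bins)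

-- ===== LEMMAS AND PROOFS =====

-- reference mutual recursions: run-start and run-end indices of the suffix starting
-- at position i, in the "outside a run" (F) / "inside a run" (T) states
mutual
def sF : Int → List Bool → List Int
  | _, [] => []
  | i, true :: r => i :: sT (i + 1) r
  | i, false :: r => sF (i + 1) r
def sT : Int → List Bool → List Int
  | _, [] => []
  | i, true :: r => sT (i + 1) r
  | i, false :: r => sF (i + 1) r
end

mutual
def eF : Int → List Bool → List Int
  | _, [] => []
  | i, true :: r => eT (i + 1) r
  | i, false :: r => eF (i + 1) r
def eT : Int → List Bool → List Int
  | i, [] => [i]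
  | i, true :: r => eT (i + 1) r
  | i, false :: r => i :: eF (i + 1) r
end

-- the zip-ranges combinator B ends with
def Z (ss es : List Int) : List (List Int) :=
  (ss.zip es).map (fun p => PySem.List.pyRange p.1 p.2 1)

-- startsB generalized over the offset and the shifted-in previous bit equals sF/sT
lemma startsB_aux (b : List Bool) : ∀ (i : Int) (prev : Bool),
    (((PySem.List.enumerate ((prev :: b).zip b) i).filter (fun p => p.2.2 && !p.2.1)).map (·.1))
      = if prev then sT i b else sF i b := by
  induction b with
  | nil => intro i prev; cases prev <;> simp [sT, sF, PySem.List.enumerate_nil]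
  | cons c r ih =>
      intro i prev
      have : (prev :: c :: r).zip (c :: r) = (prev, c) :: ((c :: r).zip r) := rfl
      rw [this, PySem.List.enumerate_cons]
      cases prev <;> cases c <;>
        simp [List.filter, sF, sT, ih (i + 1) true, ih (i + 1) false]

-- endsB generalized over the offset equals eF
lemma endsB_aux (b : List Bool) : ∀ (i : Int),
    (((PySem.List.enumerate (b.zip (b.drop 1 ++ [false])) i).filter (fun p => p.2.1 && !p.2.2)).map (·.1 + 1))
      = eF i b := by
  induction b with
  | nil => intro i; simp [eF, PySem.List.enumerate_nil]
  | cons c r ih =>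
      intro i
      match r with
      | [] =>
          cases c <;> simp [eF, eT, PySem.List.enumerate_cons, PySem.List.enumerate_nil,
            List.filter, List.zip]
      | d :: r' =>
          have hz : (c :: d :: r').zip ((c :: d :: r').drop 1 ++ [false])
              = (c, d) :: ((d :: r').zip ((d :: r').drop 1 ++ [false])) := rfl
          rw [hz, PySem.List.enumerate_cons]
          have ihr := ih (i + 1)
          cases c <;> cases d <;>
            simp_all [List.filter, eF, eT]

-- eT always yields a head ≥ its offset
lemma eT_shape (r : List Bool) : ∀ (i : Int), ∃ e es, eT i r = e :: es ∧ i ≤ e := by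
  induction r with
  | nil => intro i; exact ⟨i, [], rfl, le_refl i⟩
  | cons c r ih =>
      intro i
      cases c
      · exact ⟨i, eF (i + 1) r, rfl, le_refl i⟩
      · obtain ⟨e, es, he, hle⟩ := ih (i + 1)
        exact ⟨e, es, he, by omega⟩

-- the groups accumulator factors out of A's loop
lemma loopA_groups (xs : List Bool) :
    ∀ (i : Int) (groups : List (List Int)) (cur : List Int),
      flushA (loopA i (groups, cur) xs) = groups ++ flushA (loopA i ([], cur) xs) := by
  induction xs with
  | nil =>
      intro i groups cur
      by_cases h : cur = [] <;> simp [loopA, flushA, h]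
  | cons b rest ih =>
      intro i groups cur
      cases b with
      | true => simp only [loopA, if_pos]; exact ih (i + 1) groups (cur ++ [i])
      | false =>
          by_cases h : cur = []
          · simp only [loopA, Bool.false_eq_true, ne_eq, h, not_true_eq_false, if_false]
            exact ih (i + 1) groups []
          · simp only [loopA, Bool.false_eq_true, ne_eq, if_false]
            rw [if_pos h, if_pos h, ih (i + 1) (groups ++ [cur]) [], ih (i + 1) ([] ++ [cur]) []]
            simp

-- main invariant: A's loop produces exactly the zipped boundary ranges, in both states
lemma loopA_Z (xs : List Bool) :
    (∀ (i : Int), flushA (loopA i ([], []) xs) = Z (sF i xs) (eF i xs)) ∧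
    (∀ (i : Int) (cur : List Int) (e : Int) (es : List Int), cur ≠ [] → eT i xs = e :: es →
      flushA (loopA i ([], cur) xs) = (cur ++ PySem.List.pyRange i e 1) :: Z (sT i xs) es) := by
  induction xs with
  | nil =>
      constructor
      · intro i; simp [loopA, flushA, sF, eF, Z]
      · intro i cur e es hcur he
        simp only [eT] at he
        obtain ⟨rfl, rfl⟩ : i = e ∧ ([] : List Int) = es := by
          constructor <;> [exact (List.cons.injEq ..).mp he |>.1;
                          exact (List.cons.injEq ..).mp he |>.2]
        simp [loopA, flushA, hcur, sT, Z, PySem.List.pyRange_one_eq_nil (le_refl i)]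
  | cons b rest ih =>
      constructor
      · intro i
        cases b with
        | false =>
            simp only [loopA, Bool.false_eq_true, ne_eq, not_true_eq_false, if_false]
            rw [show flushA (loopA (i+1) ([], []) rest) = Z (sF (i+1) rest) (eF (i+1) rest)
                from ih.1 (i+1)]
            simp [sF, eF]
        | true =>
            simp only [loopA, if_pos]
            obtain ⟨e, es, he, hle⟩ := eT_shape rest (i + 1)
            rw [ih.2 (i + 1) ([] ++ [i]) e es (by simp) he]
            have hr : PySem.List.pyRange i e 1 = i :: PySem.List.pyRange (i + 1) e 1 :=
              PySem.List.pyRange_one_cons (by omega)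
            simp [sF, eF, he, Z, hr]
      · intro i cur e es hcur he
        cases b with
        | false =>
            simp only [eT] at he
            obtain ⟨rfl, hes⟩ : i = e ∧ eF (i + 1) rest = es := by
              constructor <;> [exact (List.cons.injEq ..).mp he |>.1;
                              exact (List.cons.injEq ..).mp he |>.2]
            simp only [loopA, Bool.false_eq_true, ne_eq, if_false]
            rw [if_pos hcur, loopA_groups rest (i + 1) ([] ++ [cur]) [], ih.1 (i + 1)]
            simp [sT, PySem.List.pyRange_one_eq_nil (le_refl i), hes, Z]
        | true =>
            simp only [eT] at he
            obtain ⟨e', es', he', hle'⟩ := eT_shape rest (i + 1)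
            have hee : e' = e ∧ es' = es := by
              rw [he'] at he
              exact ⟨(List.cons.injEq ..).mp he |>.1, (List.cons.injEq ..).mp he |>.2⟩
            obtain ⟨rfl, rfl⟩ := hee
            simp only [loopA, if_pos]
            rw [ih.2 (i + 1) (cur ++ [i]) e' es' (by simp) he']
            have hr : PySem.List.pyRange i e' 1 = i :: PySem.List.pyRange (i + 1) e' 1 :=
              PySem.List.pyRange_one_cons (by omega)
            simp [sT, hr]

-- ===== VERDICT (by name: the statement is the Claim_ definition above) =====
theorem group_contiguous_bins_spec : Claim_equal_group_contiguous_bins := by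
  intro xs _
  show group_contiguous_bins xs = group_contiguous_bins_alt xs
  unfold group_contiguous_bins group_contiguous_bins_alt
  rw [(loopA_Z xs).1 0]
  unfold Z
  rw [show startsB xs = sF 0 xs from by
        have := startsB_aux xs 0 false
        simpa [startsB, PySem.List.enumerate] using this,
      show endsB xs = eF 0 xs from by
        have := endsB_aux xs 0
        simpa [endsB, PySem.List.enumerate] using this]
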